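-- pv_equiv track=rewrite | github.com/tayler-id/mindpattern-v3 | orchestrator/analyzer.py | _dedup_sections
-- ===== SOURCE A (Python) =====
-- def _dedup_sections(content: str) -> str:
--     """Remove duplicate ## sections from markdown content.
--
--     Keeps the first occurrence of each heading and drops subsequent duplicates.
--     """
--     lines = content.split("\n")
--     result: list[str] = []
--     seen_headings: set[str] = set()
--     skipping = False
--
--     for line in lines:
--         if line.startswith("## "):
--             heading = line.lstrip("#").strip().lower()
--             if heading in seen_headings:
--                 # Duplicate heading — skip it and its body
--                 skipping = True
--                 continue
--             else:
--                 seen_headings.add(heading)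
--                 skipping = False
--
--         if not skipping:
--             result.append(line)
--
--     return "\n".join(result)
-- ===== SOURCE B (Python) =====
-- def _dedup_sections(content: str) -> str:
--     """Remove duplicate ## sections: group lines into a preamble plus
--     '## ' blocks, then keep only the first block per normalized heading."""
--     lines = content.split("\n")
--     preamble = []
--     i = 0
--     while i < len(lines) and not lines[i].startswith("## "):
--         preamble.append(lines[i])
--         i += 1
--     blocks = []
--     while i < len(lines):
--         j = i + 1
--         while j < len(lines) and not lines[j].startswith("## "):
--             j += 1
--         blocks.append(lines[i:j])
--         i = j
--     result = preamble
--     seen = set()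
--     for block in blocks:
--         key = block[0].lstrip("#").strip().lower()
--         if key not in seen:
--             seen.add(key)
--             result.extend(block)
--     return "\n".join(result)
-- ===== Notes on version B (the rewrite author's own statement) =====
-- stated objective: simpler
-- what changed: Replaces A's line-by-line state machine with a skipping flag by a group-then-filter pipeline: split the lines into a preamble plus heading blocks, then keep the first block per normalized heading.
import Mathlib
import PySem

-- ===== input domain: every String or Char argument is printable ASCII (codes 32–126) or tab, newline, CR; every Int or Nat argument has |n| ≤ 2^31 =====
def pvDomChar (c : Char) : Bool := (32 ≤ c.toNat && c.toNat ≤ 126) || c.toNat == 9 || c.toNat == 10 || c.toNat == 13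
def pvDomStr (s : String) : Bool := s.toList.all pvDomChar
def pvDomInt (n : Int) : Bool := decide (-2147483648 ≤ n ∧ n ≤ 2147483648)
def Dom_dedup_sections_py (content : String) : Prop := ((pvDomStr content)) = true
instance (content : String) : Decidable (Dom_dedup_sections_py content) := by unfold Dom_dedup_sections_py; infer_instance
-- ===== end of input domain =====

-- B replaces A's skipping-flag state machine by a group-then-filter pipeline
-- (preamble + heading blocks, keep first block per normalized heading); objective: simpler decomposition, same cost.

-- the heading boundary prefix, shared verbatim by both Pythons
def pvHdr : List Char := ['#', '#', ' ']

-- line.lstrip("#").strip().lower(): lstrip("#") is ported by hand as dropWhile (· == '#'),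
-- exact because lstrip(chars) removes exactly the leading characters from the set {'#'}
def pvKey (l : List Char) : List Char :=
  PySem.Chars.lower (PySem.Chars.strip (l.dropWhile (· == '#')))

-- ===== PORT A =====
-- one iteration of A's for-loop over state (result, seen_headings, skipping)
def pvStepA (st : List (List Char) × PySem.Set (List Char) × Bool) (line : List Char) :
    List (List Char) × PySem.Set (List Char) × Bool :=
  let (result, seen, skipping) := st
  if PySem.Chars.startswith line pvHdr then
    let heading := pvKey line
    if PySem.Set.contains seen heading then
      (result, seen, true)          -- duplicate: skip it and its body (continue)
    else
      (result ++ [line], seen.add heading, false)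
  else
    if !skipping then (result ++ [line], seen, skipping) else (result, seen, skipping)

def dedup_sections_py (content : String) : String :=
  let lines := PySem.Chars.splitOn content.toList ['\n']
  let st := lines.foldl pvStepA ([], PySem.Set.empty, false)
  String.ofList (PySem.Chars.join ['\n'] st.1)

-- ===== PORT B =====
-- group the tail (starting at the first '## ' line) into blocks: heading line plus its body
def pvBlocks : List (List Char) → List (List (List Char))
  | [] => []
  | l :: ls =>
      (l :: ls.takeWhile (fun x => !PySem.Chars.startswith x pvHdr)) ::
        pvBlocks (ls.dropWhile (fun x => !PySem.Chars.startswith x pvHdr))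
termination_by ls => ls.length
decreasing_by
  have := List.length_dropWhile_le (fun x => !PySem.Chars.startswith x pvHdr) ls
  simp; omega

-- keep a block only if its heading key was not seen before
def pvFilterBlocks : List (List (List Char)) → PySem.Set (List Char) → List (List Char)
  | [], _ => []
  | b :: bs, seen =>
      let key := pvKey b.headI
      if PySem.Set.contains seen key then pvFilterBlocks bs seen
      else b ++ pvFilterBlocks bs (seen.add key)

def dedup_sections_py_alt (content : String) : String :=
  let lines := PySem.Chars.splitOn content.toList ['\n']
  let preamble := lines.takeWhile (fun x => !PySem.Chars.startswith x pvHdr)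
  let blocks := pvBlocks (lines.dropWhile (fun x => !PySem.Chars.startswith x pvHdr))
  String.ofList (PySem.Chars.join ['\n'] (preamble ++ pvFilterBlocks blocks PySem.Set.empty))

-- ===== PRECONDITION & SPEC =====
def Spec_dedup_sections_py (content : String) (out : String) : Prop := out = dedup_sections_py_alt content
instance (content : String) (out : String) : Decidable (Spec_dedup_sections_py content out) := by unfold Spec_dedup_sections_py; infer_instance

-- ===== CLAIM (what is proved, stated in full; the proofs are below) =====
def Claim_equal_dedup_sections_py : Prop := ∀ (content : String), Dom_dedup_sections_py content → Spec_dedup_sections_py content (dedup_sections_py content)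

-- ===== LEMMAS AND PROOFS =====

-- A's loop, rephrased as structural recursion on the remaining lines (proof-only helper)
def pvAux : List (List Char) → PySem.Set (List Char) → Bool → List (List Char)
  | [], _, _ => []
  | l :: ls, seen, skipping =>
    if PySem.Chars.startswith l pvHdr then
      if PySem.Set.contains seen (pvKey l) then pvAux ls seen true
      else l :: pvAux ls (seen.add (pvKey l)) false
    else
      if skipping then pvAux ls seen skipping else l :: pvAux ls seen skipping

theorem pvFoldA_eq (lines : List (List Char)) :
    ∀ (res : List (List Char)) (seen : PySem.Set (List Char)) (sk : Bool),
    (lines.foldl pvStepA (res, seen, sk)).1 = res ++ pvAux lines seen sk := by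
  induction lines with
  | nil => intro res seen sk; simp [pvAux]
  | cons l ls ih =>
      intro res seen sk
      simp only [List.foldl_cons, pvStepA, pvAux]
      split_ifs with h1 h2 h3 <;> simp_all

theorem pvAux_eq (lines : List (List Char)) :
    ∀ (seen : PySem.Set (List Char)) (b : Bool),
    pvAux lines seen b =
      (if b then [] else lines.takeWhile (fun x => !PySem.Chars.startswith x pvHdr)) ++
        pvFilterBlocks (pvBlocks (lines.dropWhile (fun x => !PySem.Chars.startswith x pvHdr))) seen := by
  induction lines with
  | nil => intro seen b; cases b <;> simp [pvAux, pvBlocks, pvFilterBlocks]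
  | cons l ls ih =>
      intro seen b
      by_cases h : PySem.Chars.startswith l pvHdr
      · rw [pvAux]
        simp only [h, if_true, List.takeWhile_cons, List.dropWhile_cons, Bool.not_true,
          Bool.false_eq_true, if_false]
        rw [pvBlocks, pvFilterBlocks]
        simp only [List.headI_cons]
        by_cases hc : PySem.Set.contains seen (pvKey l)
        · simp only [hc, if_true]
          rw [ih seen true]
          cases b <;> simp
        · simp only [hc, if_false, Bool.false_eq_true]
          rw [ih (seen.add (pvKey l)) false]
          cases b <;> simp
      · rw [pvAux]
        simp only [h, if_false, Bool.false_eq_true, List.takeWhile_cons, List.dropWhile_cons,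
          Bool.not_false, if_true]
        cases b
        · simp only [if_false, Bool.false_eq_true]
          rw [ih seen false]
          simp
        · simp only [if_true]
          rw [ih seen true]
          simp

-- ===== VERDICT (by name: the statement is the Claim_ definition above) =====
theorem dedup_sections_py_spec : Claim_equal_dedup_sections_py := by
  intro content _
  unfold Spec_dedup_sections_py dedup_sections_py dedup_sections_py_alt
  simp only []
  rw [pvFoldA_eq, pvAux_eq]
  simp
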